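-- pv_equiv track=rewrite | github.com/HazyResearch/bootleg | bootleg/dataset.py | get_structural_entity_str
-- ===== SOURCE A (Python) =====
-- def get_structural_entity_str(items, max_tok_len, sep_tok):
--     """For structural resources in items. Returns sep_tok joined list of items such
--     that the number of words is less than max tok len.
--
--     Args:
--         items: list of structural resources
--         max_tok_len: maximum token length
--         sep_tok: token to separate out resources
--
--     Returns:
--         result string, number of items that went beyond ``max_tok_len``
--
--     """
--     i = 1
--     over_len = 0
--     while True:
--         res = f" {sep_tok} " + f" {sep_tok} ".join(items[:i])
--         if len(res.split()) > max_tok_len or i > len(items):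
--             if i < len(items):
--                 over_len = 1
--             res = f" {sep_tok} " + f" {sep_tok} ".join(items[: max(1, i - 1)])
--             break
--         i += 1
--     return res, over_len
-- ===== SOURCE B (Python) =====
-- def get_structural_entity_str(items, max_tok_len, sep_tok):
--     """Single pass over per-item word counts; joins once at the end."""
--     sep = f" {sep_tok} "
--     ws = len(sep.split())
--     n = len(items)
--     cut = n + 1
--     total = 0
--     for i in range(1, n + 1):
--         total += len(items[i - 1].split())
--         if i * ws + total > max_tok_len:
--             cut = i
--             break
--     res = sep + sep.join(items[: max(1, cut - 1)])
--     return res, (1 if cut < n else 0)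
-- ===== Notes on version B (the rewrite author's own statement) =====
-- stated objective: faster
-- what changed: Instead of rebuilding and re-splitting the joined string on every loop iteration (quadratic in total text length), B computes each item's word count once, scans the running total to find the cutoff index, and builds the joined string exactly once.
import Mathlib
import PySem

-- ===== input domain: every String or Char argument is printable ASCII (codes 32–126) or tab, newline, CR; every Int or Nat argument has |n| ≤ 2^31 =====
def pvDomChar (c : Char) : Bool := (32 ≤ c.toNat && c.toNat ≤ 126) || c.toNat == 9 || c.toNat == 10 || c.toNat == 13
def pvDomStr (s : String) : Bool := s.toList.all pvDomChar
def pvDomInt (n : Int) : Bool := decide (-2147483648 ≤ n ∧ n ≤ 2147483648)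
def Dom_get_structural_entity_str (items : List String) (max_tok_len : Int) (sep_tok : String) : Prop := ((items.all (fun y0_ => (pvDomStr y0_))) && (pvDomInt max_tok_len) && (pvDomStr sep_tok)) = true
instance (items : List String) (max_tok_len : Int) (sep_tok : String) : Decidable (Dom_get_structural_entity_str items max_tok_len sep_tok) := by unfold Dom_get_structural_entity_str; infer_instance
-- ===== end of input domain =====

-- ===== PORT A =====
-- B changes: word counts are computed per item once and the string is joined once, instead of
-- re-joining and re-splitting a growing string on every iteration (objective: faster).

-- A's `while True` loop: i starts at 1; terminates because the condition holds once i > len(items).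
def pvALoop (itemsC : List (List Char)) (max_tok_len : Int) (sepC : List Char) (i : Nat) :
    List Char × Int :=
  let res := sepC ++ PySem.Chars.join sepC (itemsC.take i)
  if ((PySem.Chars.split₀ res).length : Int) > max_tok_len ∨ itemsC.length < i then
    let over_len : Int := if i < itemsC.length then 1 else 0
    (sepC ++ PySem.Chars.join sepC (itemsC.take (max 1 (i - 1))), over_len)
  else
    pvALoop itemsC max_tok_len sepC (i + 1)
  termination_by itemsC.length + 1 - i
  decreasing_by omega

def get_structural_entity_str (items : List String) (max_tok_len : Int) (sep_tok : String) : String × Int :=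
  let r := pvALoop (items.map String.toList) max_tok_len (' ' :: (sep_tok.toList ++ [' '])) 1
  (String.ofList r.1, r.2)

-- ===== PORT B =====
-- len(s.split()), as Int
def pvWc (s : List Char) : Int := ((PySem.Chars.split₀ s).length : Int)

-- Source B's for-loop: running total of word counts; returns the cutoff index (n+1 if never over).
def pvBFind (counts : List Int) (ws max_tok_len : Int) (i : Nat) (total : Int) (n : Nat) : Nat :=
  match counts with
  | [] => n + 1
  | c :: rest =>
    let total := total + c
    if (i : Int) * ws + total > max_tok_len then i else pvBFind rest ws max_tok_len (i + 1) total n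

def get_structural_entity_str_alt (items : List String) (max_tok_len : Int) (sep_tok : String) : String × Int :=
  let itemsC := items.map String.toList
  let sepC := ' ' :: (sep_tok.toList ++ [' '])
  let ws := pvWc sepC
  let n := itemsC.length
  let cut := pvBFind (itemsC.map pvWc) ws max_tok_len 1 0 n
  let res := sepC ++ PySem.Chars.join sepC (itemsC.take (max 1 (cut - 1)))
  (String.ofList res, if cut < n then (1 : Int) else 0)

-- ===== PRECONDITION & SPEC =====
def Spec_get_structural_entity_str (items : List String) (max_tok_len : Int) (sep_tok : String) (out : String × Int) : Prop := out = get_structural_entity_str_alt items max_tok_len sep_tok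
instance (items : List String) (max_tok_len : Int) (sep_tok : String) (out : String × Int) : Decidable (Spec_get_structural_entity_str items max_tok_len sep_tok out) := by unfold Spec_get_structural_entity_str; infer_instance

-- ===== CLAIM (what is proved, stated in full; the proofs are below) =====
def Claim_equal_get_structural_entity_str : Prop := ∀ (items : List String) (max_tok_len : Int) (sep_tok : String), Dom_get_structural_entity_str items max_tok_len sep_tok → Spec_get_structural_entity_str items max_tok_len sep_tok (get_structural_entity_str items max_tok_len sep_tok)

-- ===== LEMMAS AND PROOFS =====

-- split₀.go only prepends the reversed accumulator
theorem pv_go_acc (s : List Char) : ∀ cur acc,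
    PySem.Chars.split₀.go s cur acc = acc.reverse ++ PySem.Chars.split₀.go s cur [] := by
  induction s with
  | nil =>
    intro cur acc
    simp only [PySem.Chars.split₀.go]
    by_cases h : cur.isEmpty <;> simp [h]
  | cons c rest ih =>
    intro cur acc
    simp only [PySem.Chars.split₀.go]
    by_cases hs : PySem.Chars.isspace c
    · by_cases h : cur.isEmpty <;>
        simp [hs, h, ih [] acc, ih [] (cur.reverse :: acc), ih [] [cur.reverse]]
    · simp [hs, ih (c :: cur) acc]

-- splitting a whitespace-joined concatenation: the words are the two sides' words
theorem pv_go_append_space (b : List Char) : ∀ (a cur : List Char),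
    PySem.Chars.split₀.go (a ++ ' ' :: b) cur [] =
      PySem.Chars.split₀.go a cur [] ++ PySem.Chars.split₀ b := by
  intro a
  induction a with
  | nil =>
    intro cur
    simp only [List.nil_append, PySem.Chars.split₀.go, PySem.Chars.split₀]
    by_cases h : cur.isEmpty <;>
      simp [h, PySem.Chars.isspace, pv_go_acc b [] [cur.reverse]]
  | cons c a' ih =>
    intro cur
    simp only [List.cons_append, PySem.Chars.split₀.go]
    by_cases hs : PySem.Chars.isspace c
    · by_cases h : cur.isEmpty <;>
        simp [hs, h, ih [], pv_go_acc a' [] [cur.reverse], pv_go_acc (a' ++ ' ' :: b) [] [cur.reverse]]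
    · simp [hs, ih (c :: cur)]

theorem pv_split0_append_space (a b : List Char) :
    PySem.Chars.split₀ (a ++ ' ' :: b) = PySem.Chars.split₀ a ++ PySem.Chars.split₀ b := by
  simpa [PySem.Chars.split₀] using pv_go_append_space b a []

theorem pv_split0_cons_space (b : List Char) :
    PySem.Chars.split₀ (' ' :: b) = PySem.Chars.split₀ b := by
  simpa using pv_split0_append_space [] b

-- the words of " sep " ++ " sep ".join(l), for nonempty l
theorem pv_split0_joined (s : List Char) : ∀ (l : List (List Char)), l ≠ [] →
    PySem.Chars.split₀ ((' ' :: (s ++ [' '])) ++ PySem.Chars.join (' ' :: (s ++ [' '])) l) =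
      l.flatMap (fun x => PySem.Chars.split₀ s ++ PySem.Chars.split₀ x) := by
  intro l
  induction l with
  | nil => intro h; exact absurd rfl h
  | cons x rest ih =>
    intro _
    cases rest with
    | nil =>
      have : (' ' :: (s ++ [' '])) ++ PySem.Chars.join (' ' :: (s ++ [' '])) [x]
          = ' ' :: (s ++ ' ' :: x) := by
        simp [PySem.Chars.join_singleton]
      rw [this, pv_split0_cons_space, pv_split0_append_space]
      simp
    | cons y r =>
      have hJ : PySem.Chars.join (' ' :: (s ++ [' '])) (x :: y :: r)
          = x ++ (' ' :: (s ++ [' '])) ++ PySem.Chars.join (' ' :: (s ++ [' '])) (y :: r) := by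
        simp [PySem.Chars.join_cons_cons]
      have hsplit : (' ' :: (s ++ [' '])) ++ PySem.Chars.join (' ' :: (s ++ [' '])) (x :: y :: r)
          = ((' ' :: (s ++ [' '])) ++ x) ++
              ' ' :: (s ++ [' '] ++ PySem.Chars.join (' ' :: (s ++ [' '])) (y :: r)) := by
        rw [hJ]; simp
      have h1 : (' ' :: (s ++ [' '])) ++ x = ' ' :: (s ++ ' ' :: x) := by simp
      have hI : PySem.Chars.split₀ (s ++ [' '] ++ PySem.Chars.join (' ' :: (s ++ [' '])) (y :: r))
          = (y :: r).flatMap (fun x => PySem.Chars.split₀ s ++ PySem.Chars.split₀ x) := by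
        have e : (' ' :: (s ++ [' '])) ++ PySem.Chars.join (' ' :: (s ++ [' '])) (y :: r)
            = ' ' :: (s ++ [' '] ++ PySem.Chars.join (' ' :: (s ++ [' '])) (y :: r)) := by simp
        rw [← pv_split0_cons_space (s ++ [' '] ++ PySem.Chars.join (' ' :: (s ++ [' '])) (y :: r)),
            ← e, ih (by simp)]
      rw [hsplit, pv_split0_append_space, h1, pv_split0_cons_space, pv_split0_append_space, hI]
      simp

-- word count of the joined string, as B computes it
theorem pv_split0_empty : PySem.Chars.split₀ ([] : List Char) = [] := by
  simp [PySem.Chars.split₀, PySem.Chars.split₀.go]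

theorem pv_split0_sep (s : List Char) :
    PySem.Chars.split₀ (' ' :: (s ++ [' '])) = PySem.Chars.split₀ s := by
  rw [pv_split0_cons_space]
  have : s ++ [' '] = s ++ ' ' :: ([] : List Char) := rfl
  rw [this, pv_split0_append_space, pv_split0_empty, List.append_nil]

theorem pv_wc_flatMap (s : List Char) : ∀ (l : List (List Char)),
    (((l.flatMap fun x => PySem.Chars.split₀ s ++ PySem.Chars.split₀ x).length : Int)) =
      (l.length : Int) * ((PySem.Chars.split₀ s).length : Int) + (l.map pvWc).sum := by
  intro l
  induction l with
  | nil => simp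
  | cons a t ih =>
    simp only [List.flatMap_cons, List.length_append, List.map_cons, List.sum_cons,
      List.length_cons, pvWc] at *
    push_cast at *
    rw [ih]; ring

theorem pv_wc_joined (s : List Char) (l : List (List Char)) (h : l ≠ []) :
    pvWc ((' ' :: (s ++ [' '])) ++ PySem.Chars.join (' ' :: (s ++ [' '])) l) =
      (l.length : Int) * pvWc (' ' :: (s ++ [' '])) + (l.map pvWc).sum := by
  unfold pvWc
  rw [pv_split0_joined s l h, pv_split0_sep]
  exact pv_wc_flatMap s l

-- the loop invariant: A's loop from i = j+1 computes B's result from the cutoff index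
theorem pv_loop_eq (itemsC : List (List Char)) (mt : Int) (s : List Char) :
    ∀ (k j : Nat), itemsC.length = j + k →
    pvALoop itemsC mt (' ' :: (s ++ [' '])) (j + 1) =
      (let cut := pvBFind ((itemsC.map pvWc).drop j) (pvWc (' ' :: (s ++ [' ']))) mt (j + 1)
                    (((itemsC.map pvWc).take j).sum) itemsC.length
       ((' ' :: (s ++ [' '])) ++ PySem.Chars.join (' ' :: (s ++ [' '])) (itemsC.take (max 1 (cut - 1))),
        if cut < itemsC.length then (1 : Int) else 0)) := by
  intro k
  induction k with
  | zero =>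
    intro j hj
    rw [pvALoop]
    have hdrop : (itemsC.map pvWc).drop j = [] := by
      apply List.drop_eq_nil_of_le; simp; omega
    simp only [hdrop, pvBFind]
    rw [if_pos (Or.inr (by omega))]
    have hje : j = itemsC.length := by omega
    subst hje
    simp only [Nat.add_sub_cancel]
  | succ k ih =>
    intro j hj
    have hjlt : j < itemsC.length := by omega
    have hjm : j < (itemsC.map pvWc).length := by simpa using hjlt
    have hdrop : (itemsC.map pvWc).drop j = (itemsC.map pvWc)[j] :: (itemsC.map pvWc).drop (j + 1) :=
      List.drop_eq_getElem_cons hjm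
    have hsum : ((itemsC.map pvWc).take j).sum + (itemsC.map pvWc)[j] =
        ((itemsC.map pvWc).take (j + 1)).sum := (List.sum_take_succ _ _ hjm).symm
    -- A's loop condition at i = j + 1 equals B's count test
    have htk : itemsC.take (j + 1) ≠ [] := by
      have hl : (itemsC.take (j + 1)).length = j + 1 := by
        rw [List.length_take]; omega
      intro hnil; rw [hnil] at hl; simp at hl
    have hlen : ((itemsC.take (j + 1)).length : Int) = (j : Int) + 1 := by
      rw [List.length_take]; push_cast; omega
    have hcond : ((PySem.Chars.split₀ ((' ' :: (s ++ [' '])) ++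
          PySem.Chars.join (' ' :: (s ++ [' '])) (itemsC.take (j + 1)))).length : Int) =
        ((j : Int) + 1) * pvWc (' ' :: (s ++ [' '])) + ((itemsC.map pvWc).take (j + 1)).sum := by
      have hwj := pv_wc_joined s (itemsC.take (j + 1)) htk
      unfold pvWc at hwj ⊢
      rw [hwj, hlen, List.map_take]
    rw [pvALoop]
    simp only [hdrop, pvBFind]
    by_cases hc : ((j : Int) + 1) * pvWc (' ' :: (s ++ [' '])) +
        (((itemsC.map pvWc).take j).sum + (itemsC.map pvWc)[j]) > mt
    · have hc' : ((PySem.Chars.split₀ ((' ' :: (s ++ [' '])) ++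
            PySem.Chars.join (' ' :: (s ++ [' '])) (itemsC.take (j + 1)))).length : Int) > mt := by
        rw [hcond, ← hsum]; linarith
      have hcB : (((j + 1 : Nat) : Int)) * pvWc (' ' :: (s ++ [' '])) +
          (((itemsC.map pvWc).take j).sum + (itemsC.map pvWc)[j]) > mt := by
        push_cast; push_cast at hc; linarith
      rw [if_pos (Or.inl hc'), if_pos hcB]
    · have hc' : ¬ (((PySem.Chars.split₀ ((' ' :: (s ++ [' '])) ++
            PySem.Chars.join (' ' :: (s ++ [' '])) (itemsC.take (j + 1)))).length : Int) > mt ∨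
            itemsC.length < j + 1) := by
        rintro (hbad | hbad)
        · rw [hcond, ← hsum] at hbad; linarith
        · omega
      have hcB : ¬ ((((j + 1 : Nat) : Int)) * pvWc (' ' :: (s ++ [' '])) +
          (((itemsC.map pvWc).take j).sum + (itemsC.map pvWc)[j]) > mt) := by
        push_cast; push_cast at hc; linarith
      rw [if_neg hc', if_neg hcB, hsum]
      exact ih (j + 1) (by omega)

-- ===== VERDICT (by name: the statement is the Claim_ definition above) =====
theorem get_structural_entity_str_spec : Claim_equal_get_structural_entity_str := by
  intro items mt sep _
  unfold Spec_get_structural_entity_str get_structural_entity_str get_structural_entity_str_alt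
  have h := pv_loop_eq (items.map String.toList) mt sep.toList
    (items.map String.toList).length 0 (Nat.zero_add _).symm
  simp only [List.drop_zero, List.take_zero, List.sum_nil, Nat.zero_add] at h
  simp only [h]
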